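-- pv_equiv track=rewrite | github.com/cla7aye15I4nd/TypePython | tests/fixtures/valid/advanced/control_flow_complex/nested_loops.py | three_level_nesting
-- ===== SOURCE A (Python) =====
-- def three_level_nesting(n: int) -> int:
--     count: int = 0
--     i: int = 1
--     while i <= n:
--         j: int = 1
--         while j <= n:
--             k: int = 1
--             while k <= n:
--                 count = count + 1
--                 k = k + 1
--             j = j + 1
--         i = i + 1
--     return count
-- ===== SOURCE B (Python) =====
-- def three_level_nesting(n: int) -> int:
--     return max(0, n) ** 3
-- ===== Notes on version B (the rewrite author's own statement) =====
-- stated objective: faster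
-- what changed: Replaces the triple nested counting loop by the closed form max(0, n)**3.
import Mathlib
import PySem

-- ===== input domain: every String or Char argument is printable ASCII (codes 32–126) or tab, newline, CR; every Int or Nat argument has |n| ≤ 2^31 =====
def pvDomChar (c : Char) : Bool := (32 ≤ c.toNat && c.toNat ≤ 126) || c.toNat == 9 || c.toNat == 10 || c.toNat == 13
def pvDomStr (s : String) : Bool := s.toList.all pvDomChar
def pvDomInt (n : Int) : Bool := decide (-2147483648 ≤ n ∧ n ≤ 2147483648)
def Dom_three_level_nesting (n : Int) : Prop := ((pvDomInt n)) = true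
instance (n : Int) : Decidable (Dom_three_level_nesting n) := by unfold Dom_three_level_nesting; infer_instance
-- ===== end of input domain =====

-- ===== PORT A =====
-- inner 'while k <= n' loop
def tlnLoopK (n k count : Int) : Int :=
  if k ≤ n then tlnLoopK n (k + 1) (count + 1) else count
termination_by (n + 1 - k).toNat
decreasing_by omega

-- middle 'while j <= n' loop
def tlnLoopJ (n j count : Int) : Int :=
  if j ≤ n then tlnLoopJ n (j + 1) (tlnLoopK n 1 count) else count
termination_by (n + 1 - j).toNat
decreasing_by omega

-- outer 'while i <= n' loop
def tlnLoopI (n i count : Int) : Int :=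
  if i ≤ n then tlnLoopI n (i + 1) (tlnLoopJ n 1 count) else count
termination_by (n + 1 - i).toNat
decreasing_by omega

def three_level_nesting (n : Int) : Int := tlnLoopI n 1 0

-- ===== PORT B =====
-- closed form: max(0, n) ** 3
def three_level_nesting_alt (n : Int) : Int := (max 0 n) ^ 3

-- ===== PRECONDITION & SPEC =====
def Spec_three_level_nesting (n : Int) (out : Int) : Prop := out = three_level_nesting_alt n
instance (n : Int) (out : Int) : Decidable (Spec_three_level_nesting n out) := by unfold Spec_three_level_nesting; infer_instance

-- ===== CLAIM (what is proved, stated in full; the proofs are below) =====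
def Claim_equal_three_level_nesting : Prop := ∀ (n : Int), Dom_three_level_nesting n → Spec_three_level_nesting n (three_level_nesting n)

-- ===== LEMMAS AND PROOFS =====
theorem tlnLoopK_eq (n : Int) : ∀ (m : Nat) (k count : Int), (n + 1 - k).toNat = m →
    tlnLoopK n k count = count + max 0 (n + 1 - k) := by
  intro m
  induction m with
  | zero => intro k c hm; rw [tlnLoopK, if_neg (by omega)]; omega
  | succ m ih =>
      intro k c hm
      rw [tlnLoopK, if_pos (by omega), ih (k + 1) (c + 1) (by omega)]
      omega

theorem tlnLoopJ_eq (n : Int) : ∀ (m : Nat) (j count : Int), (n + 1 - j).toNat = m →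
    tlnLoopJ n j count = count + max 0 (n + 1 - j) * max 0 n := by
  intro m
  induction m with
  | zero =>
      intro j c hm
      rw [tlnLoopJ, if_neg (by omega)]
      have hz : max 0 (n + 1 - j) = 0 := by omega
      rw [hz]; ring
  | succ m ih =>
      intro j c hm
      rw [tlnLoopJ, if_pos (by omega), ih (j + 1) _ (by omega), tlnLoopK_eq n (n + 1 - 1).toNat 1 c rfl]
      have h1 : max 0 (n + 1 - 1) = max 0 n := by omega
      have h2 : max 0 (n + 1 - j) = max 0 (n + 1 - (j + 1)) + 1 := by omega
      rw [h1, h2]; ring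

theorem tlnLoopI_eq (n : Int) : ∀ (m : Nat) (i count : Int), (n + 1 - i).toNat = m →
    tlnLoopI n i count = count + max 0 (n + 1 - i) * (max 0 n * max 0 n) := by
  intro m
  induction m with
  | zero =>
      intro i c hm
      rw [tlnLoopI, if_neg (by omega)]
      have hz : max 0 (n + 1 - i) = 0 := by omega
      rw [hz]; ring
  | succ m ih =>
      intro i c hm
      rw [tlnLoopI, if_pos (by omega), ih (i + 1) _ (by omega), tlnLoopJ_eq n (n + 1 - 1).toNat 1 c rfl]
      have h1 : max 0 (n + 1 - 1) = max 0 n := by omega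
      have h2 : max 0 (n + 1 - i) = max 0 (n + 1 - (i + 1)) + 1 := by omega
      rw [h1, h2]; ring

-- ===== VERDICT (by name: the statement is the Claim_ definition above) =====
theorem three_level_nesting_spec : Claim_equal_three_level_nesting := by
  intro n _
  unfold Spec_three_level_nesting three_level_nesting three_level_nesting_alt
  rw [tlnLoopI_eq n (n + 1 - 1).toNat 1 0 rfl]
  have h1 : max 0 (n + 1 - 1) = max 0 n := by omega
  rw [h1]
  ring
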